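-- pv_equiv track=rewrite | github.com/khanhdk0000/coding-interview | coderbyte/arrayaddition.py | ArrayAdditionI
-- ===== SOURCE A (Python) =====
-- def ArrayAdditionI(arr):
--     # Find the largest number in the array
--     largest = max(arr)
--
--     # Remove the largest number from the array
--     arr.remove(largest)
--
--     # Initialize a set to keep track of possible sums
--     possible_sums = {0}
--
--     # Iterate through each number in the array
--     for num in arr:
--         # Create a new set to store new sums
--         new_sums = set()
--
--         # For each existing sum, add the current number and store it in new_sums
--         for s in possible_sums:
--             new_sums.add(s + num)
--
--         # Update possible_sums with new_sums
--         possible_sums.update(new_sums)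
--
--     # Check if the largest number can be formed by any combination of other numbers
--     return "true" if largest in possible_sums else "false"
-- ===== SOURCE B (Python) =====
-- def ArrayAdditionI(arr):
--     # Same side effect as A: the first occurrence of the largest element is removed.
--     largest = max(arr)
--     arr.remove(largest)
--
--     # Recursive include/exclude subset-sum search instead of accumulating a set of sums.
--     def can(i, target):
--         if target == 0:
--             return True
--         if i == len(arr):
--             return False
--         return can(i + 1, target) or can(i + 1, target - arr[i])
--
--     return "true" if can(0, largest) else "false"
-- ===== Notes on version B (the rewrite author's own statement) =====
-- stated objective: alternative
-- what changed: Replaces the loop that accumulates a set of all achievable subset sums with a recursive include/exclude subset-sum search that exits as soon as the remaining target is 0.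
import Mathlib
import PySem

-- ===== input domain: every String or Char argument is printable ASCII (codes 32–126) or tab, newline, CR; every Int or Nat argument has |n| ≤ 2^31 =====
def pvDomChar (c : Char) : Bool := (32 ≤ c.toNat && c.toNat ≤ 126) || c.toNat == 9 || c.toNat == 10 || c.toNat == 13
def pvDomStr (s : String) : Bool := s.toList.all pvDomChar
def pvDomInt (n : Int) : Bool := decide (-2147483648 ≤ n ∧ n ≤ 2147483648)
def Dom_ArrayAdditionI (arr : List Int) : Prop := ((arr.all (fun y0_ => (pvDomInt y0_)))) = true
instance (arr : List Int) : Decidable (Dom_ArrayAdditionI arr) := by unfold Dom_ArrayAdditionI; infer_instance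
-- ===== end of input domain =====

-- B replaces A's set-of-achievable-sums accumulation with a recursive include/exclude
-- subset-sum search; like A, it removes the first occurrence of max(arr) from the argument
-- in place (equivalence proved about the return value; the mutation is identical).


-- ===== PORT A =====
def ArrayAdditionI (arr : List Int) : String :=
  match PySem.List.max? arr (fun x => x) with
  | none => ""   -- unreachable under Pre_: max([]) raises ValueError
  | some largest =>
    let rest := (PySem.List.remove? arr largest).getD []
    let possible := rest.foldl
      (fun S num =>
        let newSums := S.foldl (fun ns s => PySem.Set.add ns (s + num)) PySem.Set.empty
        PySem.Set.update S newSums)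
      (PySem.Set.ofList [0])
    if PySem.Set.contains possible largest then "true" else "false"

-- ===== PORT B =====
def canAlt : List Int → Int → Bool
  | xs, t =>
    if t == 0 then true
    else
      match xs with
      | [] => false
      | x :: rest => canAlt rest t || canAlt rest (t - x)

def ArrayAdditionI_alt (arr : List Int) : String :=
  match PySem.List.max? arr (fun x => x) with
  | none => ""   -- unreachable under Pre_: max([]) raises ValueError
  | some largest =>
    let rest := (PySem.List.remove? arr largest).getD []
    if canAlt rest largest then "true" else "false"

-- ===== PRECONDITION & SPEC =====
-- A raises ValueError on the empty list (max of an empty sequence); excluded.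
def Pre_ArrayAdditionI (arr : List Int) : Prop := arr ≠ []
instance (arr : List Int) : Decidable (Pre_ArrayAdditionI arr) := by unfold Pre_ArrayAdditionI; infer_instance
def pvWitness_ArrayAdditionI : List Int := [1, 2, 3]

def Spec_ArrayAdditionI (arr : List Int) (out : String) : Prop := out = ArrayAdditionI_alt arr
instance (arr : List Int) (out : String) : Decidable (Spec_ArrayAdditionI arr out) := by unfold Spec_ArrayAdditionI; infer_instance

-- ===== CLAIM (what is proved, stated in full; the proofs are below) =====
def Claim_equal_ArrayAdditionI : Prop := ∀ (arr : List Int), Dom_ArrayAdditionI arr → Pre_ArrayAdditionI arr → Spec_ArrayAdditionI arr (ArrayAdditionI arr)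

-- ===== LEMMAS AND PROOFS =====

theorem canAlt_zero (xs : List Int) : canAlt xs 0 = true := by
  unfold canAlt; simp

theorem canAlt_nil (t : Int) : canAlt [] t = (t == 0) := by
  unfold canAlt; split_ifs with h <;> simp_all

theorem canAlt_cons (x : Int) (xs : List Int) (t : Int) :
    canAlt (x :: xs) t = (canAlt xs t || canAlt xs (t - x)) := by
  by_cases h : t = 0
  · subst h; simp [canAlt_zero]
  · conv_lhs => unfold canAlt
    simp [h]

-- membership after one step of A's set update
theorem mem_step (S : PySem.Set Int) (x y : Int) :
    y ∈ PySem.Set.update S (S.foldl (fun ns s => PySem.Set.add ns (s + x)) PySem.Set.empty)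
      ↔ y ∈ S ∨ ∃ s ∈ S, y = s + x := by
  rw [PySem.Set.mem_update]
  have h : S.foldl (fun ns s => PySem.Set.add ns (s + x)) PySem.Set.empty
      = PySem.Set.update PySem.Set.empty (S.map (fun s => s + x)) := by
    rw [PySem.Set.update, List.foldl_map]
  rw [h, PySem.Set.mem_update]
  simp [PySem.Set.empty, eq_comm]

theorem mem_foldA (l : List Int) (S : PySem.Set Int) (t : Int) :
    t ∈ l.foldl
        (fun S num =>
          PySem.Set.update S (S.foldl (fun ns s => PySem.Set.add ns (s + num)) PySem.Set.empty))
        S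
      ↔ ∃ s ∈ S, canAlt l (t - s) = true := by
  induction l generalizing S with
  | nil =>
    simp only [List.foldl_nil, canAlt_nil, beq_iff_eq, sub_eq_zero]
    constructor
    · intro h; exact ⟨t, h, rfl⟩
    · rintro ⟨s, hs, rfl⟩; exact hs
  | cons x xs ih =>
    rw [List.foldl_cons, ih]
    constructor
    · rintro ⟨s, hs, hc⟩
      rw [mem_step] at hs
      rcases hs with hs | ⟨s', hs', rfl⟩
      · exact ⟨s, hs, by rw [canAlt_cons]; simp [hc]⟩
      · refine ⟨s', hs', ?_⟩
        rw [canAlt_cons]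
        have : t - (s' + x) = t - s' - x := by ring
        rw [this] at hc
        simp [hc]
    · rintro ⟨s, hs, hc⟩
      rw [canAlt_cons, Bool.or_eq_true] at hc
      rcases hc with hc | hc
      · exact ⟨s, (mem_step S x s).mpr (Or.inl hs), hc⟩
      · refine ⟨s + x, (mem_step S x (s + x)).mpr (Or.inr ⟨s, hs, rfl⟩), ?_⟩
        have : t - (s + x) = t - s - x := by ring
        rw [this]; exact hc

theorem contains_fold_eq_canAlt (rest : List Int) (t : Int) :
    PySem.Set.contains
      (rest.foldl
        (fun S num =>
          PySem.Set.update S (S.foldl (fun ns s => PySem.Set.add ns (s + num)) PySem.Set.empty))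
        (PySem.Set.ofList [0])) t
      = canAlt rest t := by
  have key : t ∈ rest.foldl
      (fun S num =>
        PySem.Set.update S (S.foldl (fun ns s => PySem.Set.add ns (s + num)) PySem.Set.empty))
      (PySem.Set.ofList [0]) ↔ canAlt rest t = true := by
    rw [mem_foldA]
    constructor
    · rintro ⟨s, hs, h⟩
      rw [PySem.Set.mem_ofList] at hs
      simp only [List.mem_singleton] at hs
      subst hs; simpa using h
    · intro h
      refine ⟨0, ?_, by simpa using h⟩
      rw [PySem.Set.mem_ofList]; simp
  have h1 : PySem.Set.contains
      (rest.foldl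
        (fun S num =>
          PySem.Set.update S (S.foldl (fun ns s => PySem.Set.add ns (s + num)) PySem.Set.empty))
        (PySem.Set.ofList [0])) t
      = decide (t ∈ rest.foldl
        (fun S num =>
          PySem.Set.update S (S.foldl (fun ns s => PySem.Set.add ns (s + num)) PySem.Set.empty))
        (PySem.Set.ofList [0])) := by
    simp [PySem.Set.contains]
  rw [h1]
  cases hc : canAlt rest t with
  | false =>
    simp only [decide_eq_false_iff_not]
    intro hmem
    have h2 := key.mp hmem
    rw [hc] at h2
    exact absurd h2 (by decide)
  | true => exact decide_eq_true (key.mpr hc)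

-- ===== VERDICT (by name: the statement is the Claim_ definition above) =====
theorem ArrayAdditionI_spec : Claim_equal_ArrayAdditionI := by
  intro arr _ _
  unfold Spec_ArrayAdditionI ArrayAdditionI ArrayAdditionI_alt
  cases PySem.List.max? arr (fun x => x) with
  | none => rfl
  | some largest => simp only [contains_fold_eq_canAlt]
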